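-- pv_equiv track=rewrite | github.com/arspaper/Encrypting-Algorythms | MAINproject.py | polybius_cipher
-- ===== SOURCE A (Python) =====
-- def polybius_cipher(text):
--     polybius_square = [
--         ['A', 'B', 'C', 'D', 'E'],
--         ['F', 'G', 'H', 'I', 'K'],
--         ['L', 'M', 'N', 'O', 'P'],
--         ['Q', 'R', 'S', 'T', 'U'],
--         ['V', 'W', 'X', 'Y', 'Z']
--     ]
--
--     result = ''
--     for char in text:
--         if char.isalpha() and char.isascii():
--             if char == 'J':
--                 char = 'I'
--             for row in range(5):
--                 for col in range(5):
--                     if polybius_square[row][col] == char: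
--                         result += f'{row + 1}{col + 1} '
--         else:
--             result += char
--     return result.rstrip()
-- ===== SOURCE B (Python) =====
-- def polybius_cipher(text):
--     # closed-form arithmetic instead of scanning the 5x5 grid
--     pieces = []
--     for ch in text:
--         if ch.isalpha() and ch.isascii():
--             if 'A' <= ch <= 'Z':
--                 o = ord('I' if ch == 'J' else ch) - 65
--                 if o > 9:
--                     o -= 1
--                 pieces.append(f'{o // 5 + 1}{o % 5 + 1} ')
--             # lowercase ASCII letters match nothing in the uppercase grid: emit nothing
--         else:
--             pieces.append(ch)
--     return ''.join(pieces).rstrip()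
-- ===== Notes on version B (the rewrite author's own statement) =====
-- stated objective: faster
-- what changed: Replaced the nested 5x5 grid search per character by closed-form index arithmetic (ord-based row/column computation with the J->I merge handled by one index shift), collecting pieces and joining once instead of quadratic repeated string concatenation.
import Mathlib
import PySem

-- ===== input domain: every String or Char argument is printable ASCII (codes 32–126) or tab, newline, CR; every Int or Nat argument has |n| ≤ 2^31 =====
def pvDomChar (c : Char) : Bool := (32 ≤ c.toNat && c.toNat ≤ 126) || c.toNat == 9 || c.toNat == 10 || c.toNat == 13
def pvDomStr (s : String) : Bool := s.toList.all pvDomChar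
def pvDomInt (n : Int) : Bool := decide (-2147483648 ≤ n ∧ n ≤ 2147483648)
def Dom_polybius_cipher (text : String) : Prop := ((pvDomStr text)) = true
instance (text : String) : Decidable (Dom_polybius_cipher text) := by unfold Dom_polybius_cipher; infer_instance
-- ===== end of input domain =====

-- B replaces A's nested 5×5 grid search per character by closed-form index arithmetic (simpler, constant work per letter).

-- char.isascii(): exact for every Char (ASCII = code point < 128)
def pyIsascii (c : Char) : Bool := c.toNat < 128

-- ===== PORT A =====
def pvSquare : List (List Char) :=
  [['A', 'B', 'C', 'D', 'E'],
   ['F', 'G', 'H', 'I', 'K'],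
   ['L', 'M', 'N', 'O', 'P'],
   ['Q', 'R', 'S', 'T', 'U'],
   ['V', 'W', 'X', 'Y', 'Z']]

def polybius_cipher (text : String) : String :=
  let result : List Char :=
    text.toList.foldl (fun result char =>
      if PySem.Chars.isalpha char && pyIsascii char then
        let char := if char = 'J' then 'I' else char
        (PySem.List.pyRange 0 5 1).foldl (fun result row =>
          (PySem.List.pyRange 0 5 1).foldl (fun result col =>
            if PySem.List.pyGetD (PySem.List.pyGetD pvSquare row []) col ' ' = char then
              result ++ (PySem.Int.toChars (row + 1) ++ PySem.Int.toChars (col + 1) ++ [' '])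
            else result) result) result
      else result ++ [char]) []
  String.ofList (PySem.Chars.rstrip result)

-- ===== PORT B =====
def polybius_cipher_alt (text : String) : String :=
  let pieces : List (List Char) :=
    text.toList.foldl (fun pieces ch =>
      if PySem.Chars.isalpha ch && pyIsascii ch then
        if 'A' ≤ ch ∧ ch ≤ 'Z' then
          let o : Int := ((if ch = 'J' then 'I' else ch).toNat : Int) - 65
          let o : Int := if o > 9 then o - 1 else o
          pieces ++ [PySem.Int.toChars (PySem.Int.floordiv o 5 + 1) ++
                     PySem.Int.toChars (PySem.Int.mod o 5 + 1) ++ [' ']]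
        else pieces
      else pieces ++ [[ch]]) []
  String.ofList (PySem.Chars.rstrip (PySem.Chars.join [] pieces))

-- ===== PRECONDITION & SPEC =====
def Spec_polybius_cipher (text : String) (out : String) : Prop := out = polybius_cipher_alt text
instance (text : String) (out : String) : Decidable (Spec_polybius_cipher text out) := by unfold Spec_polybius_cipher; infer_instance

-- ===== CLAIM (what is proved, stated in full; the proofs are below) =====
def Claim_equal_polybius_cipher : Prop := ∀ (text : String), Dom_polybius_cipher text → Spec_polybius_cipher text (polybius_cipher text)

-- ===== LEMMAS AND PROOFS =====

-- the per-character output of A's loop body started from the empty accumulator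
def pvEmitA (char : Char) : List Char :=
  if PySem.Chars.isalpha char && pyIsascii char then
    let char := if char = 'J' then 'I' else char
    (PySem.List.pyRange 0 5 1).foldl (fun result row =>
      (PySem.List.pyRange 0 5 1).foldl (fun result col =>
        if PySem.List.pyGetD (PySem.List.pyGetD pvSquare row []) col ' ' = char then
          result ++ (PySem.Int.toChars (row + 1) ++ PySem.Int.toChars (col + 1) ++ [' '])
        else result) result) []
  else [char]

-- the per-character piece list of B's loop body started from the empty accumulator
def pvEmitB (ch : Char) : List (List Char) :=
  if PySem.Chars.isalpha ch && pyIsascii ch then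
    if 'A' ≤ ch ∧ ch ≤ 'Z' then
      let o : Int := ((if ch = 'J' then 'I' else ch).toNat : Int) - 65
      let o : Int := if o > 9 then o - 1 else o
      [PySem.Int.toChars (PySem.Int.floordiv o 5 + 1) ++
       PySem.Int.toChars (PySem.Int.mod o 5 + 1) ++ [' ']]
    else []
  else [[ch]]

theorem pv_foldl_step_flatMap {α β : Type} (f : List β → α → List β) (g : α → List β)
    (hf : ∀ a x, f a x = a ++ g x) : ∀ (l : List α) (acc : List β),
    l.foldl f acc = acc ++ l.flatMap g := by
  intro l
  induction l with
  | nil => intro acc; simp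
  | cons x xs ih => intro acc; simp [List.foldl_cons, hf, ih]

theorem pv_foldl_shift {α β : Type} (f : List β → α → List β) (g : α → List β)
    (hf : ∀ a x, f a x = a ++ g x) (l : List α) (acc : List β) :
    l.foldl f acc = acc ++ l.foldl f [] := by
  rw [pv_foldl_step_flatMap f g hf, pv_foldl_step_flatMap f g hf]
  simp

theorem pvEmitA_step (a : List Char) (c : Char) :
    (fun result char =>
      if PySem.Chars.isalpha char && pyIsascii char then
        let char := if char = 'J' then 'I' else char
        (PySem.List.pyRange 0 5 1).foldl (fun result row =>
          (PySem.List.pyRange 0 5 1).foldl (fun result col =>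
            if PySem.List.pyGetD (PySem.List.pyGetD pvSquare row []) col ' ' = char then
              result ++ (PySem.Int.toChars (row + 1) ++ PySem.Int.toChars (col + 1) ++ [' '])
            else result) result) result
      else result ++ [char]) a c = a ++ pvEmitA c := by
  by_cases h : (PySem.Chars.isalpha c && pyIsascii c) = true
  · simp only [pvEmitA, h, if_pos]
    apply pv_foldl_shift _ (fun row =>
      (PySem.List.pyRange 0 5 1).foldl (fun result col =>
        if PySem.List.pyGetD (PySem.List.pyGetD pvSquare row []) col ' '
            = (if c = 'J' then 'I' else c) then
          result ++ (PySem.Int.toChars (row + 1) ++ PySem.Int.toChars (col + 1) ++ [' '])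
        else result) [])
    intro a' row
    apply pv_foldl_shift _ (fun col =>
      if PySem.List.pyGetD (PySem.List.pyGetD pvSquare row []) col ' '
          = (if c = 'J' then 'I' else c) then
        PySem.Int.toChars (row + 1) ++ PySem.Int.toChars (col + 1) ++ [' ']
      else [])
    intro a'' col
    by_cases hc : PySem.List.pyGetD (PySem.List.pyGetD pvSquare row []) col ' '
        = (if c = 'J' then 'I' else c)
    · simp [hc]
    · simp [hc]
  · simp only [pvEmitA]
    rw [if_neg h, if_neg h]

theorem pvEmitB_step (a : List (List Char)) (c : Char) :
    (fun pieces ch =>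
      if PySem.Chars.isalpha ch && pyIsascii ch then
        if 'A' ≤ ch ∧ ch ≤ 'Z' then
          let o : Int := ((if ch = 'J' then 'I' else ch).toNat : Int) - 65
          let o : Int := if o > 9 then o - 1 else o
          pieces ++ [PySem.Int.toChars (PySem.Int.floordiv o 5 + 1) ++
                     PySem.Int.toChars (PySem.Int.mod o 5 + 1) ++ [' ']]
        else pieces
      else pieces ++ [[ch]]) a c = a ++ pvEmitB c := by
  simp only [pvEmitB]
  by_cases h : (PySem.Chars.isalpha c && pyIsascii c) = true
  · by_cases h2 : 'A' ≤ c ∧ c ≤ 'Z' <;> simp [h, h2]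
  · simp [h]

-- the two per-character emissions agree on every domain character (finite check over codes < 128)
theorem pvEmit_eq (c : Char) (h : pvDomChar c = true) :
    pvEmitA c = (pvEmitB c).flatten := by
  have hlt : c.toNat < 128 := by
    simp only [pvDomChar, Bool.or_eq_true, Bool.and_eq_true, decide_eq_true_eq, beq_iff_eq] at h
    omega
  have key : ∀ n ∈ List.range 128, pvEmitA (Char.ofNat n) = (pvEmitB (Char.ofNat n)).flatten := by
    set_option maxRecDepth 8192 in decide
  have := key c.toNat (by simpa using hlt)
  rwa [Char.ofNat_toNat] at this

theorem pv_flatten_flatMap {α β : Type} (g : α → List (List β)) (l : List α) :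
    (List.flatMap g l).flatten = l.flatMap (fun x => (g x).flatten) := by
  induction l with
  | nil => rfl
  | cons x xs ih => simp [List.flatMap_cons, List.flatten_append, ih]

theorem pv_join_nil (l : List (List Char)) : PySem.Chars.join [] l = l.flatten := by
  induction l with
  | nil => rfl
  | cons x xs ih =>
    simp [PySem.Chars.join, List.intercalate] at ih ⊢
    cases xs <;> simp_all [List.intersperse]

-- ===== VERDICT (by name: the statement is the Claim_ definition above) =====
theorem polybius_cipher_spec : Claim_equal_polybius_cipher := by
  intro text hdom
  unfold Spec_polybius_cipher polybius_cipher polybius_cipher_alt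
  simp only [pv_foldl_step_flatMap _ pvEmitA pvEmitA_step,
      pv_foldl_step_flatMap _ pvEmitB pvEmitB_step, pv_join_nil,
      List.nil_append, pv_flatten_flatMap]
  congr 2
  apply List.flatMap_congr
  intro c hc
  apply pvEmit_eq
  have : text.toList.all pvDomChar = true := hdom
  exact List.all_eq_true.mp this c hc
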